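-- pv_equiv track=rewrite | github.com/morganstanley/treadmill | treadmill/cli/__init__.py | combine
-- ===== SOURCE A (Python) =====
-- def combine(list_of_values, sep=','):
--     """Split and sum list of sep string into one list."""
--     combined = sum(
--         [str(values).split(sep) for values in list(list_of_values)],
--         []
--     )
--
--     if combined == ['-']:
--         combined = None
--
--     return combined
-- ===== SOURCE B (Python) =====
-- def combine(list_of_values, sep=','):
--     """Split and sum list of sep string into one list."""
--     values = list(list_of_values)
--
--     def parts(vs):
--         if not vs:
--             return []
--         if len(vs) == 1:
--             return str(vs[0]).split(sep)
--         mid = len(vs) // 2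
--         return parts(vs[:mid]) + parts(vs[mid:])
--
--     combined = parts(values)
--     if combined == ['-']:
--         combined = None
--     return combined
-- ===== Notes on version B (the rewrite author's own statement) =====
-- stated objective: faster
-- what changed: Replaces the quadratic sum() of per-element split lists with a divide-and-conquer recursion that splits halves and concatenates balanced sublists.
-- outside the precondition, e.g. on combine(['a'], ''): A raises ValueError, B raises ValueError
import Mathlib
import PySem

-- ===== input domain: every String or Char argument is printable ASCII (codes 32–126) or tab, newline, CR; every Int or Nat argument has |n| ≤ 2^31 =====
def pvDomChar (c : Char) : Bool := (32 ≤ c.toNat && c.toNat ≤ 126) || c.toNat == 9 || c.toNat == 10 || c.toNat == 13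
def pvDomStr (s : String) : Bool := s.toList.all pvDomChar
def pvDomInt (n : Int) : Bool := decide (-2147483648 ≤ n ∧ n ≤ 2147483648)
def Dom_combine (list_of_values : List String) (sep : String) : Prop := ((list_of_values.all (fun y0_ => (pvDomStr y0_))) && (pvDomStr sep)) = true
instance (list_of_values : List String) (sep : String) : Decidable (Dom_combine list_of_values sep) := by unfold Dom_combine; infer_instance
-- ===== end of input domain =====

-- B flattens by divide-and-conquer halving instead of A's sum() over per-element split lists; alternative decomposition (balanced concatenation).


-- ===== PORT A =====
-- sum([str(v).split(sep) for v in list(list_of_values)], []) : left fold of ++ over the list of split lists.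
-- str(v) is the identity (v is already a string). sep ≠ "" is guaranteed by Pre_combine (splitOn is the sep ≠ "" form of split).
def combine (list_of_values : List String) (sep : String) : Option (List String) :=
  let combined :=
    (list_of_values.map (fun values => (PySem.Str.split? values sep).getD [])).foldl (· ++ ·) ([] : List String)
  if combined = ["-"] then none else some combined

-- ===== PORT B =====
-- parts(vs): empty → [], singleton → split, else recurse on vs[:mid] and vs[mid:] (0 ≤ mid ≤ len, so take/drop are exact).
def combine_parts (sep : String) (vs : List String) : List String :=
  if vs.length = 0 then []
  else if vs.length = 1 then (PySem.Str.split? (vs.headD "") sep).getD []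
  else
    combine_parts sep (vs.take (vs.length / 2)) ++ combine_parts sep (vs.drop (vs.length / 2))
termination_by vs.length
decreasing_by
  · simp only [List.length_take]; omega
  · simp only [List.length_drop]; omega

def combine_alt (list_of_values : List String) (sep : String) : Option (List String) :=
  let combined := combine_parts sep list_of_values
  if combined = ["-"] then none else some combined

-- ===== PRECONDITION & SPEC =====
-- Pre_ excludes sep = "", on which Python's str.split raises ValueError("empty separator").
def Pre_combine (list_of_values : List String) (sep : String) : Prop := sep ≠ ""
instance (list_of_values : List String) (sep : String) : Decidable (Pre_combine list_of_values sep) := by unfold Pre_combine; infer_instance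
def pvWitness_combine : List String × String := (["a,b", "-"], ",")

def Spec_combine (list_of_values : List String) (sep : String) (out : Option (List String)) : Prop := out = combine_alt list_of_values sep
instance (list_of_values : List String) (sep : String) (out : Option (List String)) : Decidable (Spec_combine list_of_values sep out) := by unfold Spec_combine; infer_instance

-- ===== CLAIM (what is proved, stated in full; the proofs are below) =====
def Claim_equal_combine : Prop := ∀ (list_of_values : List String) (sep : String), Dom_combine list_of_values sep → Pre_combine list_of_values sep → Spec_combine list_of_values sep (combine list_of_values sep)

-- ===== LEMMAS AND PROOFS =====
theorem combine_parts_eq_flatMap (sep : String) (vs : List String) :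
    combine_parts sep vs = vs.flatMap (fun v => (PySem.Str.split? v sep).getD []) := by
  induction vs using combine_parts.induct with
  | case1 vs h =>
    rw [combine_parts]
    simp_all [List.length_eq_zero_iff]
  | case2 vs h h1 =>
    rw [combine_parts]
    obtain ⟨v, rfl⟩ := List.length_eq_one_iff.mp h1
    simp [h1]
  | case3 vs h h1 ih1 ih2 =>
    rw [combine_parts]
    simp only [h, h1, if_false, ih1, ih2]
    rw [← List.flatMap_append, List.take_append_drop]

theorem foldl_append_map (f : String → List String) (l : List String) :
    (l.map f).foldl (· ++ ·) ([] : List String) = l.flatMap f := by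
  rw [List.foldl_map]
  have : ∀ (l : List String) (acc : List String),
      l.foldl (fun acc v => acc ++ f v) acc = acc ++ l.flatMap f := by
    intro l
    induction l with
    | nil => simp
    | cons x xs ih => intro acc; simp [ih]
  simpa using this l []

-- ===== VERDICT (by name: the statement is the Claim_ definition above) =====
theorem combine_spec : Claim_equal_combine := by
  intro lov sep _ _
  unfold Spec_combine combine combine_alt
  rw [foldl_append_map, combine_parts_eq_flatMap]
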